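-- pv_equiv track=rewrite | github.com/AeroX2/comp343 | hash.py | helper
-- ===== SOURCE A (Python) =====
-- def helper(powers):
--     final = []
--
--     if powers:
--         power = powers[0][0]
--         max_count = powers[0][1]
--     else:
--         return [(1,1)]
--
--     for count in range(max_count+1):
--         blob = helper(powers[1:])
--         for tmp in blob:
--             a = tmp[0]*pow(power, count)
--             b = tmp[1]*pow(power, (max_count-count))
--             final.append((a,b))
--     return final
-- ===== SOURCE B (Python) =====
-- def helper(powers):
--     result = [(1, 1)]
--     for power, max_count in powers:
--         result = [(a * pow(power, c), b * pow(power, max_count - c))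
--                   for a, b in result for c in range(max_count + 1)]
--     return result
-- ===== Notes on version B (the rewrite author's own statement) =====
-- stated objective: alternative
-- what changed: Replaces A's per-call recursion (which recomputes helper(powers[1:]) on every iteration of the outer loop) with a single left-to-right pass that rebuilds an accumulator list of (divisor, codivisor) pairs via a comprehension.
import Mathlib
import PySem

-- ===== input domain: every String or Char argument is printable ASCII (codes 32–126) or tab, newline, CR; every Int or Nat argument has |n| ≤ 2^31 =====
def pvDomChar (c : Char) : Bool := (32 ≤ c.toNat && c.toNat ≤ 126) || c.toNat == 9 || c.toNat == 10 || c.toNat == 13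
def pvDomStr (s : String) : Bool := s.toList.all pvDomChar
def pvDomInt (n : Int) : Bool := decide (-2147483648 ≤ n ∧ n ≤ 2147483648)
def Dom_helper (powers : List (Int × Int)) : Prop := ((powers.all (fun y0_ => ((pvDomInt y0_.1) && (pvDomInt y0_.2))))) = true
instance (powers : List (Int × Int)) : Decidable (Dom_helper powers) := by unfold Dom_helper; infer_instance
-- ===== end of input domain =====

-- B replaces A's per-call recursion by a single left-to-right pass that rebuilds an
-- accumulator list of (divisor, codivisor) pairs (objective: alternative decomposition).

-- ===== PORT A =====
def helper : List (Int × Int) → List (Int × Int)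
  | [] => [(1, 1)]
  | (power, max_count) :: rest =>
    (PySem.List.pyRange 0 (max_count + 1) 1).foldl
      (fun final count =>
        let blob := helper rest
        blob.foldl
          (fun fin tmp =>
            fin ++ [(tmp.1 * power ^ count.toNat, tmp.2 * power ^ (max_count - count).toNat)])
          final)
      []

-- ===== PORT B =====
def helper_alt (powers : List (Int × Int)) : List (Int × Int) :=
  powers.foldl
    (fun result pm =>
      result.flatMap (fun t =>
        (PySem.List.pyRange 0 (pm.2 + 1) 1).map (fun c =>
          (t.1 * pm.1 ^ c.toNat, t.2 * pm.1 ^ (pm.2 - c).toNat))))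
    [(1, 1)]

-- ===== PRECONDITION & SPEC =====
def Spec_helper (powers : List (Int × Int)) (out : List (Int × Int)) : Prop := out = helper_alt powers
instance (powers : List (Int × Int)) (out : List (Int × Int)) : Decidable (Spec_helper powers out) := by unfold Spec_helper; infer_instance

-- ===== CLAIM (what is proved, stated in full; the proofs are below) =====
def Claim_equal_helper : Prop := ∀ (powers : List (Int × Int)), Dom_helper powers → Spec_helper powers (helper powers)

-- ===== LEMMAS AND PROOFS =====

-- A's recursion unfolded into flatMap/map form
theorem helper_cons (power max_count : Int) (rest : List (Int × Int)) :
    helper ((power, max_count) :: rest) =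
      (PySem.List.pyRange 0 (max_count + 1) 1).flatMap (fun count =>
        (helper rest).map (fun tmp =>
          (tmp.1 * power ^ count.toNat, tmp.2 * power ^ (max_count - count).toNat))) := by
  rw [helper]
  simp only [PySem.List.foldl_append_singleton_eq_map, PySem.List.foldl_append_eq_flatMap,
    List.nil_append]

-- B's fold with an arbitrary accumulator, expressed through A's result
theorem foldl_eq_flatMap_helper (powers : List (Int × Int)) (init : List (Int × Int)) :
    powers.foldl
      (fun result pm =>
        result.flatMap (fun t =>
          (PySem.List.pyRange 0 (pm.2 + 1) 1).map (fun c =>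
            (t.1 * pm.1 ^ c.toNat, t.2 * pm.1 ^ (pm.2 - c).toNat))))
      init =
      init.flatMap (fun t => (helper powers).map (fun u => (t.1 * u.1, t.2 * u.2))) := by
  induction powers generalizing init with
  | nil => simp [helper]
  | cons pm tl ih =>
    obtain ⟨p, m⟩ := pm
    rw [List.foldl_cons, ih, helper_cons]
    simp only [List.flatMap_assoc, List.flatMap_map, List.map_flatMap, List.map_map,
      Function.comp_def]
    congr 1
    funext t
    congr 1
    funext c
    congr 1
    funext u
    simp [mul_comm, mul_left_comm]

-- ===== VERDICT (by name: the statement is the Claim_ definition above) =====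
theorem helper_spec : Claim_equal_helper := by
  intro powers _
  unfold Spec_helper helper_alt
  rw [foldl_eq_flatMap_helper]
  simp
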